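-- pv_equiv track=rewrite | github.com/uwuChenry/CS1301 | practiceProblems.py | atlCoffee
-- ===== SOURCE A (Python) =====
-- def atlCoffee(l):
--     if l == []:
--         return {}
--     n, a, r = l[0]
--     v = atlCoffee(l[1:])
--     if r > 5:
--         if a not in v.keys():
--             v[a] = []
--         v[a].append(n)
--         v[a].sort()
--     return v
-- ===== SOURCE B (Python) =====
-- def atlCoffee(l):
--     # Single iterative pass back-to-front (matches the key order the recursive
--     # original produces), grouping names per shop, then one final sort per shop.
--     d = {}
--     for n, a, r in reversed(l):
--         if r > 5:
--             d.setdefault(a, []).append(n)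
--     for a in d:
--         d[a].sort()
--     return d
-- ===== Notes on version B (the rewrite author's own statement) =====
-- stated objective: simpler
-- what changed: Replaces the slice-based tail recursion (which re-sorts the shop's list after every single append) with one explicit back-to-front loop using dict.setdefault and a single final sort per shop.
import Mathlib
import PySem

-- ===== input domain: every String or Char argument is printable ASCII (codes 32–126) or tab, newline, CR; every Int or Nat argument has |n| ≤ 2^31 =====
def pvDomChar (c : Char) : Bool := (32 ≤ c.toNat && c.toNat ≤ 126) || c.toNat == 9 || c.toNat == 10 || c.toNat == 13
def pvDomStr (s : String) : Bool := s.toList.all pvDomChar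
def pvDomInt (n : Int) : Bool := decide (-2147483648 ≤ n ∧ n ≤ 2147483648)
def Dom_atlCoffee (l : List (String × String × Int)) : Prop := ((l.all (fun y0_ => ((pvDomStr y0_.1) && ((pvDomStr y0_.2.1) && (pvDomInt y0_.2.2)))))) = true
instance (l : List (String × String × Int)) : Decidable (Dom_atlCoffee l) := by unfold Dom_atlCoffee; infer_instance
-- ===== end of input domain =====

-- B replaces the slice-based tail recursion (re-sorting after every append) with one
-- explicit back-to-front loop using setdefault and a single final sort per shop (simpler).

-- ===== PORT A =====
-- list.sort() on a list of strings (ascending, no key)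
def pvSortS (v : List String) : List String := PySem.List.sorted v (fun x => x) false

def pvAtlA : List (String × String × Int) → PySem.Dict String (List String)
  | [] => PySem.Dict.empty
  | (n, a, r) :: rest =>
    let v := pvAtlA rest
    if r > 5 then
      let v' := if a ∉ PySem.Dict.keys v then PySem.Dict.insert v a [] else v
      PySem.Dict.insert v' a (pvSortS (PySem.Dict.getD v' a [] ++ [n]))
    else v

def atlCoffee (l : List (String × String × Int)) : List (String × List String) :=
  (pvAtlA l).items

-- ===== PORT B =====
-- body of B's loop: d.setdefault(a, []).append(n) when r > 5
def pvStep (d : PySem.Dict String (List String)) (e : String × String × Int) :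
    PySem.Dict String (List String) :=
  if e.2.2 > 5 then PySem.Dict.insert d e.2.1 (PySem.Dict.getD d e.2.1 [] ++ [e.1]) else d

def pvAtlB (l : List (String × String × Int)) : PySem.Dict String (List String) :=
  l.reverse.foldl pvStep PySem.Dict.empty

def atlCoffee_alt (l : List (String × String × Int)) : List (String × List String) :=
  -- for a in d: d[a].sort()
  (pvAtlB l).items.map (fun p => (p.1, pvSortS p.2))

-- ===== PRECONDITION & SPEC =====
def Spec_atlCoffee (l : List (String × String × Int)) (out : List (String × List String)) : Prop := out = atlCoffee_alt l
instance (l : List (String × String × Int)) (out : List (String × List String)) : Decidable (Spec_atlCoffee l out) := by unfold Spec_atlCoffee; infer_instance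

-- ===== CLAIM (what is proved, stated in full; the proofs are below) =====
def Claim_equal_atlCoffee : Prop := ∀ (l : List (String × String × Int)), Dom_atlCoffee l → Spec_atlCoffee l (atlCoffee l)

-- ===== LEMMAS AND PROOFS =====

-- the dict whose every value has been sorted
def pvMapVals (d : PySem.Dict String (List String)) : PySem.Dict String (List String) :=
  PySem.Dict.mk (d.items.map (fun p => (p.1, pvSortS p.2)))

theorem pvAny_map (xs : List (String × List String)) (a : String) :
    ((xs.map (fun p => (p.1, pvSortS p.2))).any (fun p => p.1 == a)) = xs.any (fun p => p.1 == a) := by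
  simp [List.any_map, Function.comp_def]

theorem pvKeys_mapVals (d : PySem.Dict String (List String)) :
    (pvMapVals d).keys = d.keys := by
  simp [pvMapVals, PySem.Dict.keys, List.map_map, Function.comp_def]

theorem pvGetD_mapVals (d : PySem.Dict String (List String)) (a : String) :
    (pvMapVals d).getD a [] = pvSortS (d.getD a []) := by
  obtain ⟨xs⟩ := d
  induction xs with
  | nil =>
    simp [pvMapVals, PySem.Dict.getD, PySem.Dict.get?, pvSortS, PySem.List.sorted]
  | cons x t ih =>
    by_cases h : x.1 == a
    · simp [pvMapVals, PySem.Dict.getD, PySem.Dict.get?, List.find?, h]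
    · simp only [pvMapVals, PySem.Dict.getD, PySem.Dict.get?, List.map_cons, List.find?, h] at ih ⊢
      exact ih

theorem pvGetD_of_any_false (xs : List (String × List String)) (a : String)
    (h : xs.any (fun p => p.1 == a) = false) :
    (PySem.Dict.mk xs).getD a [] = [] := by
  induction xs with
  | nil => rfl
  | cons x t ih =>
    simp only [List.any_cons, Bool.or_eq_false_iff] at h
    simp only [PySem.Dict.getD, PySem.Dict.get?, List.find?, h.1] at ih ⊢
    exact ih h.2

theorem pvGetD_of_contains_false (d : PySem.Dict String (List String)) (a : String)
    (h : d.contains a = false) : d.getD a [] = [] := by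
  obtain ⟨xs⟩ := d
  exact pvGetD_of_any_false xs a h

theorem pvMapVals_insert (d : PySem.Dict String (List String)) (a : String) (w : List String) :
    pvMapVals (d.insert a w) = (pvMapVals d).insert a (pvSortS w) := by
  obtain ⟨xs⟩ := d
  apply PySem.Dict.ext
  simp only [pvMapVals, PySem.Dict.insert, PySem.Dict.contains, pvAny_map]
  by_cases h : xs.any (fun p => p.1 == a) = true
  · simp only [h, if_true, List.map_map]
    apply List.map_congr_left
    intro p _
    by_cases hp : p.1 = a
    · simp [hp]
    · simp [hp]
  · simp [h, List.map_append]

theorem pvInsert_insert (d : PySem.Dict String (List String)) (a : String)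
    (v w : List String) : (d.insert a v).insert a w = d.insert a w := by
  obtain ⟨xs⟩ := d
  apply PySem.Dict.ext
  by_cases h : xs.any (fun p => p.1 == a) = true
  · have h1 : (PySem.Dict.mk xs).contains a = true := h
    have h2 : ((PySem.Dict.mk xs).insert a v).contains a = true :=
      PySem.Dict.contains_insert_self _ a v
    simp only [PySem.Dict.insert, PySem.Dict.contains] at h2 ⊢
    simp only [h, if_true] at h2 ⊢
    simp only [h2, if_true, List.map_map]
    apply List.map_congr_left
    intro p _
    by_cases hp : p.1 = a
    · simp [hp]
    · simp [hp]
  · have hall : ∀ p ∈ xs, (p.1 == a) = false := by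
      intro p hp
      by_contra hne
      exact h (List.any_eq_true.mpr ⟨p, hp, by simpa using hne⟩)
    simp only [PySem.Dict.insert, PySem.Dict.contains, h,
      Bool.false_eq_true, if_false, List.any_append, List.any_cons, List.any_nil,
      BEq.refl, Bool.true_or, Bool.or_true, if_true, List.map_append]
    congr 1
    · exact (List.map_congr_left (fun p hp => by simp [hall p hp])).trans (List.map_id _)
    · simp

theorem pvSortS_sortS_append (w : List String) (n : String) :
    pvSortS (pvSortS w ++ [n]) = pvSortS (w ++ [n]) := by
  apply PySem.List.sorted_eq_sorted_of_perm
  · intro x y hxy; exact hxy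
  · exact (PySem.List.sorted_perm w (fun x => x) false).append_right [n]

theorem pvAtlB_cons (x : String × String × Int) (rest : List (String × String × Int)) :
    pvAtlB (x :: rest) = pvStep (pvAtlB rest) x := by
  simp [pvAtlB, List.reverse_cons, List.foldl_append]

theorem pvMain (l : List (String × String × Int)) : pvAtlA l = pvMapVals (pvAtlB l) := by
  induction l with
  | nil => rfl
  | cons x rest ih =>
    obtain ⟨n, a, r⟩ := x
    rw [pvAtlB_cons]
    show pvAtlA ((n, a, r) :: rest) = pvMapVals (pvStep (pvAtlB rest) (n, a, r))
    simp only [pvAtlA, pvStep, ih]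
    by_cases hr : r > 5
    · simp only [hr, if_true]
      by_cases hk : a ∈ (pvMapVals (pvAtlB rest)).keys
      · have hk' : a ∈ (pvAtlB rest).keys := by rwa [pvKeys_mapVals] at hk
        have hc : (pvAtlB rest).contains a = true := by
          rw [PySem.Dict.contains_eq_decide_mem_keys]; exact decide_eq_true hk'
        simp only [hk, not_true, if_false]
        rw [pvGetD_mapVals, pvSortS_sortS_append, ← pvMapVals_insert]
      · have hk' : a ∉ (pvAtlB rest).keys := by rwa [pvKeys_mapVals] at hk
        simp only [hk, not_false_iff, if_true]
        have hc : (pvAtlB rest).contains a = false := by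
          rw [PySem.Dict.contains_eq_decide_mem_keys]; exact decide_eq_false hk'
        have hB : (pvAtlB rest).getD a [] = [] := pvGetD_of_contains_false _ a hc
        rw [PySem.Dict.getD_insert_self, hB, pvInsert_insert, ← pvMapVals_insert]
    · simp [hr]

-- ===== VERDICT (by name: the statement is the Claim_ definition above) =====
theorem atlCoffee_spec : Claim_equal_atlCoffee := by
  intro l _
  show atlCoffee l = atlCoffee_alt l
  unfold atlCoffee atlCoffee_alt
  rw [pvMain]
  rfl
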